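-- pv_equiv track=rewrite | github.com/ddfourtwo/install-mcp | server/meta_mcp_server.py | generate_test_prompts
-- ===== SOURCE A (Python) =====
-- from typing import Dict, List, Optional, Any
--
-- def generate_test_prompts(server_name: str, command: str, args: List[str]) -> List[str]:
--     """Generate test prompts based on server name and type"""
--     prompts = []
--
--     # Check for specific server names or patterns
--     server_lower = server_name.lower()
--
--     # If it's an npm package, extract the package name
--     if command == "npx" and args:
--         for arg in args:
--             if arg.startswith("@") and "/" in arg:
--                 # Extract package name like @upstash/context7-mcp
--                 package_parts = arg.split("@")[-1].split("/")[-1].split("-")[0]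
--                 prompts.append(f"Test the {package_parts} tools from {server_name}")
--                 break
--
--     # Generate prompts based on common server types
--     if "context" in server_lower:
--         prompts.extend([
--             f"Use {server_name} to get documentation for Next.js",
--             f"Test {server_name} by fetching React hooks documentation"
--         ])
--     elif "github" in server_lower:
--         prompts.extend([
--             f"Use {server_name} to list my recent repositories",
--             f"Test {server_name} by checking my GitHub notifications"
--         ])
--     elif "slack" in server_lower:
--         prompts.extend([
--             f"Use {server_name} to list my Slack channels",
--             f"Test {server_name} by checking recent messages"
--         ])
--     elif "file" in server_lower or "fs" in server_lower:
--         prompts.extend([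
--             f"Use {server_name} to list files in my home directory",
--             f"Test {server_name} file operations"
--         ])
--     elif "web" in server_lower or "browser" in server_lower:
--         prompts.extend([
--             f"Use {server_name} to fetch content from example.com",
--             f"Test {server_name} web browsing capabilities"
--         ])
--     else:
--         # Generic prompts
--         prompts.extend([
--             f"List all available tools from {server_name}",
--             f"Test a few tools from {server_name} to ensure it's working"
--         ])
--
--     return prompts
-- ===== SOURCE B (Python) =====
-- from typing import List
--
-- # Flat prompt table indexed by category number; 5 = generic fallback.
-- _PROMPTS = [
--     ["Use {s} to get documentation for Next.js",
--      "Test {s} by fetching React hooks documentation"],        # 0 context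
--     ["Use {s} to list my recent repositories",
--      "Test {s} by checking my GitHub notifications"],          # 1 github
--     ["Use {s} to list my Slack channels",
--      "Test {s} by checking recent messages"],                  # 2 slack
--     ["Use {s} to list files in my home directory",
--      "Test {s} file operations"],                              # 3 file/fs
--     ["Use {s} to fetch content from example.com",
--      "Test {s} web browsing capabilities"],                    # 4 web/browser
--     ["List all available tools from {s}",
--      "Test a few tools from {s} to ensure it's working"],      # 5 generic
-- ]
--
-- # Keyword -> category number (lower number = higher priority).
-- _KEYWORD_CATEGORY = [
--     ("context", 0), ("github", 1), ("slack", 2),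
--     ("file", 3), ("fs", 3), ("web", 4), ("browser", 4),
-- ]
--
--
-- def generate_test_prompts(server_name: str, command: str, args: List[str]) -> List[str]:
--     out = []
--     if command == "npx":
--         pkg_arg = next((a for a in args if a.startswith("@") and "/" in a), None)
--         if pkg_arg is not None:
--             pkg = pkg_arg.split("@")[-1].split("/")[-1].split("-")[0]
--             out.append(f"Test the {pkg} tools from {server_name}")
--     low = server_name.lower()
--     # Collect ALL matching categories, then pick the smallest (priority) one.
--     cat = min((c for kw, c in _KEYWORD_CATEGORY if kw in low), default=5)
--     out += [t.format(s=server_name) for t in _PROMPTS[cat]]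
--     return out
-- ===== Notes on version B (the rewrite author's own statement) =====
-- stated objective: alternative
-- what changed: B replaces the short-circuit if/elif substring cascade by collecting every matching keyword's category number into a set and taking the minimum (default = generic), then indexing a flat prompt table; the npx arg is picked with next() over a generator instead of a for/break loop.
import Mathlib
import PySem

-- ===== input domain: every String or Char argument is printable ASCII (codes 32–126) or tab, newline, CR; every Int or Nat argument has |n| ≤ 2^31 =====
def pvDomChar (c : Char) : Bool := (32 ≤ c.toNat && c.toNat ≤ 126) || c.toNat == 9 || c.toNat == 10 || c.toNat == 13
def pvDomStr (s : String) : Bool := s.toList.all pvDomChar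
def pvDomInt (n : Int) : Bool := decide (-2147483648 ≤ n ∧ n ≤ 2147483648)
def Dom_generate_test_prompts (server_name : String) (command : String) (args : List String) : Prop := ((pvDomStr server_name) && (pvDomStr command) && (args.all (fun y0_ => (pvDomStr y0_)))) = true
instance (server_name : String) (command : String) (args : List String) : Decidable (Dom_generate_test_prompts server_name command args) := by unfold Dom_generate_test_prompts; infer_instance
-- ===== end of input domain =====

-- B replaces the if/elif cascade by collecting all matching keyword categories and taking the minimum, indexing a flat prompt table (objective: alternative).

-- ===== PORT A =====
-- arg.split("@")[-1].split("/")[-1].split("-")[0]  (splitOn results are nonempty, so the pyGetD defaults are never used)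
def pvPkgName (arg : String) : String :=
  let p1 := PySem.List.pyGetD ((PySem.Str.split? arg "@").getD []) (-1) ""
  let p2 := PySem.List.pyGetD ((PySem.Str.split? p1 "/").getD []) (-1) ""
  PySem.List.pyGetD ((PySem.Str.split? p2 "-").getD []) 0 ""

-- the 'for arg in args: … break' loop of A
def pvNpxLoopA (server_name : String) : List String → List String
  | [] => []
  | arg :: rest =>
    if PySem.Str.startswith arg "@" && PySem.Str.isIn "/" arg then
      ["Test the " ++ pvPkgName arg ++ " tools from " ++ server_name]
    else pvNpxLoopA server_name rest

def generate_test_prompts (server_name : String) (command : String) (args : List String) : List String :=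
  let server_lower := PySem.Str.lower server_name
  let prompts : List String := []
  let prompts := if command == "npx" && !args.isEmpty then prompts ++ pvNpxLoopA server_name args else prompts
  if PySem.Str.isIn "context" server_lower then
    prompts ++ ["Use " ++ server_name ++ " to get documentation for Next.js",
                "Test " ++ server_name ++ " by fetching React hooks documentation"]
  else if PySem.Str.isIn "github" server_lower then
    prompts ++ ["Use " ++ server_name ++ " to list my recent repositories",
                "Test " ++ server_name ++ " by checking my GitHub notifications"]
  else if PySem.Str.isIn "slack" server_lower then
    prompts ++ ["Use " ++ server_name ++ " to list my Slack channels",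
                "Test " ++ server_name ++ " by checking recent messages"]
  else if PySem.Str.isIn "file" server_lower || PySem.Str.isIn "fs" server_lower then
    prompts ++ ["Use " ++ server_name ++ " to list files in my home directory",
                "Test " ++ server_name ++ " file operations"]
  else if PySem.Str.isIn "web" server_lower || PySem.Str.isIn "browser" server_lower then
    prompts ++ ["Use " ++ server_name ++ " to fetch content from example.com",
                "Test " ++ server_name ++ " web browsing capabilities"]
  else
    prompts ++ ["List all available tools from " ++ server_name,
                "Test a few tools from " ++ server_name ++ " to ensure it's working"]

-- ===== PORT B =====
-- _PROMPTS: flat prompt table indexed by category number; 5 = generic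
def pvPromptsB : List (String → List String) :=
  [ fun s => ["Use " ++ s ++ " to get documentation for Next.js",
              "Test " ++ s ++ " by fetching React hooks documentation"],
    fun s => ["Use " ++ s ++ " to list my recent repositories",
              "Test " ++ s ++ " by checking my GitHub notifications"],
    fun s => ["Use " ++ s ++ " to list my Slack channels",
              "Test " ++ s ++ " by checking recent messages"],
    fun s => ["Use " ++ s ++ " to list files in my home directory",
              "Test " ++ s ++ " file operations"],
    fun s => ["Use " ++ s ++ " to fetch content from example.com",
              "Test " ++ s ++ " web browsing capabilities"],
    fun s => ["List all available tools from " ++ s,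
              "Test a few tools from " ++ s ++ " to ensure it's working"] ]

-- _KEYWORD_CATEGORY: keyword → category number
def pvKeywordCat : List (String × Nat) :=
  [("context", 0), ("github", 1), ("slack", 2), ("file", 3), ("fs", 3), ("web", 4), ("browser", 4)]

def generate_test_prompts_alt (server_name : String) (command : String) (args : List String) : List String :=
  -- next((a for a in args if …), None) = List.find?
  let out : List String :=
    if command == "npx" then
      match args.find? (fun a => PySem.Str.startswith a "@" && PySem.Str.isIn "/" a) with
      | some pkg_arg =>
          let pkg := pvPkgName pkg_arg
          ["Test the " ++ pkg ++ " tools from " ++ server_name]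
      | none => []
    else []
  let low := PySem.Str.lower server_name
  -- min over ALL matching categories, default 5 (generic)
  let cats := pvKeywordCat.filterMap (fun kc => if PySem.Str.isIn kc.1 low then some kc.2 else none)
  let cat := cats.min?.getD 5
  out ++ (pvPromptsB.getD cat (fun _ => [])) server_name

-- ===== PRECONDITION & SPEC =====
def Spec_generate_test_prompts (server_name : String) (command : String) (args : List String) (out : List String) : Prop := out = generate_test_prompts_alt server_name command args
instance (server_name : String) (command : String) (args : List String) (out : List String) : Decidable (Spec_generate_test_prompts server_name command args out) := by unfold Spec_generate_test_prompts; infer_instance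

-- ===== CLAIM =====
def Claim_equal_generate_test_prompts : Prop := ∀ (server_name : String) (command : String) (args : List String), Dom_generate_test_prompts server_name command args → Spec_generate_test_prompts server_name command args (generate_test_prompts server_name command args)

-- ===== LEMMAS AND PROOFS =====

-- A's for/break loop equals B's find?-then-format
theorem pvNpxLoop_eq_find (server_name : String) (args : List String) :
    pvNpxLoopA server_name args =
      (match args.find? (fun a => PySem.Str.startswith a "@" && PySem.Str.isIn "/" a) with
       | some a => ["Test the " ++ pvPkgName a ++ " tools from " ++ server_name]
       | none => ([] : List String)) := by
  induction args with
  | nil => rfl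
  | cons a rest ih =>
    rw [pvNpxLoopA, List.find?_cons]
    cases h : PySem.Str.startswith a "@" && PySem.Str.isIn "/" a
    · simpa using ih
    · simp

-- the guarded npx prefixes agree
theorem pvPrefix_eq (server_name command : String) (args : List String) :
    (if command == "npx" && !args.isEmpty then ([] : List String) ++ pvNpxLoopA server_name args else []) =
    (if command == "npx" then
      (match args.find? (fun a => PySem.Str.startswith a "@" && PySem.Str.isIn "/" a) with
       | some a => ["Test the " ++ pvPkgName a ++ " tools from " ++ server_name]
       | none => ([] : List String))
     else []) := by
  cases args <;> cases h : command == "npx" <;> simp [h, pvNpxLoop_eq_find]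

-- ===== VERDICT =====
theorem generate_test_prompts_spec : Claim_equal_generate_test_prompts := by
  intro server_name command args _
  unfold Spec_generate_test_prompts generate_test_prompts generate_test_prompts_alt
  rw [← pvPrefix_eq]
  by_cases h1 : PySem.Str.isIn "context" (PySem.Str.lower server_name) = true <;>
  by_cases h2 : PySem.Str.isIn "github" (PySem.Str.lower server_name) = true <;>
  by_cases h3 : PySem.Str.isIn "slack" (PySem.Str.lower server_name) = true <;>
  by_cases h4 : PySem.Str.isIn "file" (PySem.Str.lower server_name) = true <;>
  by_cases h5 : PySem.Str.isIn "fs" (PySem.Str.lower server_name) = true <;>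
  by_cases h6 : PySem.Str.isIn "web" (PySem.Str.lower server_name) = true <;>
  by_cases h7 : PySem.Str.isIn "browser" (PySem.Str.lower server_name) = true <;>
  simp only [pvKeywordCat, pvPromptsB, List.filterMap, h1, h2, h3, h4, h5, h6, h7,
    Bool.not_eq_true] at * <;>
  simp [h1, h2, h3, h4, h5, h6, h7, pvKeywordCat, pvPromptsB]
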